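-- pv_equiv track=rewrite | github.com/Clara-Ye/15-112 | hw3.py | funDecode3
-- ===== SOURCE A (Python) =====
-- def funDecode3(code):
--     result = ""
--     prev = 0
--     code = code.strip()
--     for numStr in code.split(","):
--         curr = int(numStr)
--         result += chr(prev + curr)
--         prev = prev + curr
--     return result
-- ===== SOURCE B (Python) =====
-- # No running accumulator at all: each output char is computed independently as the
-- # sum of the delta prefix ending at its position (O(n^2), a genuinely different algorithm).
-- def funDecode3(code):
--     deltas = [int(s) for s in code.strip().split(",")]
--     return "".join(chr(sum(deltas[:i + 1])) for i in range(len(deltas)))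
-- ===== Notes on version B (the rewrite author's own statement) =====
-- stated objective: alternative
-- what changed: Drops A's running accumulator entirely: B parses all tokens, then computes each output character independently as chr(sum(deltas[:i+1])) over an index range (per-position prefix sums, quadratic, no carried state).
import Mathlib
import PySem

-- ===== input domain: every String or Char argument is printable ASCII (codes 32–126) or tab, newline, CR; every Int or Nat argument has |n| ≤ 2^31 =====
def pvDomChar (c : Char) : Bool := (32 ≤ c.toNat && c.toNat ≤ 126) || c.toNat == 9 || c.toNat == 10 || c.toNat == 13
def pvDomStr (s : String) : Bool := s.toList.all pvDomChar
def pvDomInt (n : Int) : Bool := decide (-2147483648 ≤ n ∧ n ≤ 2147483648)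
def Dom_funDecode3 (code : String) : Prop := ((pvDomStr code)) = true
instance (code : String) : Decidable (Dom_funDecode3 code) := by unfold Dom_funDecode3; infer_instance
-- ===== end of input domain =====

-- ===== PORT A =====
-- B drops A's running accumulator: it parses all tokens, then computes each output
-- character independently as the sum of the delta prefix at its index (objective:
-- alternative algorithm, not faster). Where Python raises (int() ValueError, chr()
-- range error) the ports use .getD 0 / Char.ofNat's fallback; those inputs are
-- excluded by Pre_funDecode3.
def funDecode3 (code : String) : String :=
  let stripped := PySem.Chars.strip code.toList
  String.ofList
    ((PySem.Chars.splitOn stripped [',']).foldl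
      (fun (st : List Char × Int) numStr =>
        let curr := (PySem.Int.ofChars? numStr).getD 0
        (st.1 ++ [Char.ofNat (st.2 + curr).toNat], st.2 + curr))
      ([], 0)).1

-- ===== PORT B =====
def funDecode3_alt (code : String) : String :=
  let deltas : List Int := (PySem.Chars.splitOn (PySem.Chars.strip code.toList) [',']).map
      (fun s => (PySem.Int.ofChars? s).getD 0)
  String.ofList
    ((List.range deltas.length).map
      (fun i => Char.ofNat ((deltas.take (i + 1)).sum).toNat))

-- ===== PRECONDITION & SPEC =====
-- Pre_ excludes inputs where A raises (ValueError from int() on a bad token, or from chr()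
-- on a running sum outside 0..0x10FFFF), and also inputs whose running sums hit the UTF-16
-- surrogate range 0xD800-0xDFFF, where A returns a lone-surrogate Python string that a Lean
-- String/Char cannot represent.
def Pre_funDecode3 (code : String) : Prop :=
  let toks := PySem.Chars.splitOn (PySem.Chars.strip code.toList) [',']
  let vals : List Int := toks.map (fun t => (PySem.Int.ofChars? t).getD 0)
  (∀ t ∈ toks, (PySem.Int.ofChars? t).isSome = true) ∧
  (∀ i ∈ List.range toks.length,
     0 ≤ (vals.take (i+1)).sum ∧ (vals.take (i+1)).sum < 1114112 ∧
     ¬(55296 ≤ (vals.take (i+1)).sum ∧ (vals.take (i+1)).sum < 57344))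
instance (code : String) : Decidable (Pre_funDecode3 code) := by
  unfold Pre_funDecode3; infer_instance
def pvWitness_funDecode3 : String := "72,29,7,0,3"
def Spec_funDecode3 (code : String) (out : String) : Prop := out = funDecode3_alt code
instance (code : String) (out : String) : Decidable (Spec_funDecode3 code out) := by unfold Spec_funDecode3; infer_instance

-- ===== CLAIM (what is proved, stated in full; the proofs are below) =====
def Claim_equal_funDecode3 : Prop := ∀ (code : String), Dom_funDecode3 code → Pre_funDecode3 code → Spec_funDecode3 code (funDecode3 code)

-- ===== LEMMAS AND PROOFS =====

-- A's interleaved fold, started at (cs, p), appends exactly one char per token: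
-- the one whose code is p plus the prefix sum of the parsed deltas up to that token
-- (stated for an arbitrary token-parsing function f).
lemma afold_eq_prefix_sums (f : List Char → Int) (toks : List (List Char))
    (cs : List Char) (p : Int) :
    (toks.foldl
      (fun (st : List Char × Int) numStr =>
        let curr := f numStr
        (st.1 ++ [Char.ofNat (st.2 + curr).toNat], st.2 + curr)) (cs, p)).1
    = cs ++ (List.range toks.length).map
        (fun i => Char.ofNat (p + (((toks.map f).take (i + 1)).sum)).toNat) := by
  induction toks generalizing cs p with
  | nil => simp
  | cons t ts ih =>
      simp only [List.foldl_cons]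
      rw [ih]
      simp only [List.length_cons, List.range_succ_eq_map, List.map_cons, List.map_map,
        List.map_cons, List.take_succ_cons, List.sum_cons, List.append_assoc,
        List.singleton_append, Function.comp_def, add_assoc]
      simp

-- ===== VERDICT (by name: the statement is the Claim_ definition above) =====
theorem funDecode3_spec : Claim_equal_funDecode3 := by
  intro code _ _
  unfold Spec_funDecode3
  simp only [funDecode3, funDecode3_alt]
  rw [afold_eq_prefix_sums (fun s => (PySem.Int.ofChars? s).getD 0)]
  simp
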